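-- pv_equiv track=rewrite | github.com/dkstlgus7571/SWP2_I | For_Eli.py | for_eli
-- ===== SOURCE A (Python) =====
-- def for_eli(mat):
--     row_idx = list(range(len(mat)))
--     col_idx = len(mat[0])
--     pivot_mat = []
--     for c in range(col_idx):
--         rows_with_nonzero = [r for r in row_idx if mat[r][c] != 0]
--         if rows_with_nonzero:
--             pivot = rows_with_nonzero[0]
--             for idx in rows_with_nonzero:
--                 pivot_mat.append(mat[idx])
--                 row_idx.remove(idx)
--     return pivot_mat
-- ===== SOURCE B (Python) =====
-- def for_eli(mat):
--     ncols = len(mat[0])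
--     buckets = [[] for _ in range(ncols)]
--     for row in mat:
--         for c, v in enumerate(row[:ncols]):
--             if v != 0:
--                 buckets[c].append(row)
--                 break
--     out = []
--     for b in buckets:
--         out.extend(b)
--     return out
-- ===== Notes on version B (the rewrite author's own statement) =====
-- stated objective: alternative
-- what changed: Instead of scanning the shrinking remaining-row list once per column and deleting emitted rows with list.remove, B makes a single pass over the rows, computing each row's first-nonzero column with an early-exit scan, buckets rows by that column, and concatenates the buckets in column order.
import Mathlib
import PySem

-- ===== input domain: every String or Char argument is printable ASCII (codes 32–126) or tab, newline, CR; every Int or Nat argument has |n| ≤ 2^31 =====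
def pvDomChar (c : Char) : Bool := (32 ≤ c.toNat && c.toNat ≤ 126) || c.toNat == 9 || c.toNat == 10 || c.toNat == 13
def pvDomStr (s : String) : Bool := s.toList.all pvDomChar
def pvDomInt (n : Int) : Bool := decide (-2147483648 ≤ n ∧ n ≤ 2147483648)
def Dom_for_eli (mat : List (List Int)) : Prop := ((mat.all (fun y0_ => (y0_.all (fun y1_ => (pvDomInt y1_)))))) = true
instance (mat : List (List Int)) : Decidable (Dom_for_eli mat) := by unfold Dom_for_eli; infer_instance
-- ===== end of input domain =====

-- B replaces A's per-column rescans of the shrinking remaining-row list (with list.remove) by a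
-- single pass: one first-nonzero scan per row, bucketed by column — same return value on Pre_.

-- ===== PORT A =====
-- Literal port of A. All range() indices are Nats; mat[r]/mat[r][c] are ported with getD,
-- which is exact on Pre_ (inside Pre_ Python A never indexes out of range).
-- Python's unused `pivot = rows_with_nonzero[0]` is dead code and is omitted.
def for_eli (mat : List (List Int)) : List (List Int) :=
  let rowIdx0 : List Nat := List.range mat.length
  let colIdx : Nat := (mat.getD 0 []).length
  let final := (List.range colIdx).foldl
    (fun (st : List Nat × List (List Int)) c =>
      let rwn := st.1.filter (fun r => decide ((mat.getD r []).getD c 0 ≠ 0))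
      if rwn.isEmpty then st
      else rwn.foldl
        (fun (st2 : List Nat × List (List Int)) idx =>
          (st2.1.erase idx, st2.2 ++ [mat.getD idx []])) st)
    (rowIdx0, [])
  final.2

-- ===== PORT B =====
-- firstNZ l c = index (counting from c) of the first nonzero entry of l: the `for c, v in
-- enumerate(row[:ncols]): if v != 0: … break` loop of Source B.
def firstNZ : List Int → Nat → Option Nat
  | [], _ => none
  | v :: rest, c => if v ≠ 0 then some c else firstNZ rest (c + 1)

def for_eli_alt (mat : List (List Int)) : List (List Int) :=
  let ncols := (mat.getD 0 []).length
  let buckets := mat.foldl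
    (fun (bks : List (List (List Int))) row =>
      match firstNZ (row.take ncols) 0 with
      | some c => bks.set c (bks.getD c [] ++ [row])
      | none => bks)
    (List.replicate ncols [])
  buckets.flatten

-- ===== PRECONDITION & SPEC =====
-- Pre_ excludes exactly the inputs where Python A raises IndexError: the empty matrix (mat[0])
-- and matrices containing an all-zero row shorter than len(mat[0]).
def Pre_for_eli (mat : List (List Int)) : Prop :=
  mat ≠ [] ∧ ∀ row ∈ mat, row.length < (mat.getD 0 []).length → ∃ v ∈ row, v ≠ 0
instance (mat : List (List Int)) : Decidable (Pre_for_eli mat) := by unfold Pre_for_eli; infer_instance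

def pvWitness_for_eli : List (List Int) := [[0, 1], [1, 0]]

def Spec_for_eli (mat : List (List Int)) (out : List (List Int)) : Prop := out = for_eli_alt mat
instance (mat : List (List Int)) (out : List (List Int)) : Decidable (Spec_for_eli mat out) := by unfold Spec_for_eli; infer_instance

-- ===== CLAIM (what is proved, stated in full; the proofs are below) =====
def Claim_equal_for_eli : Prop := ∀ (mat : List (List Int)), Dom_for_eli mat → Pre_for_eli mat → Spec_for_eli mat (for_eli mat)

-- ===== LEMMAS AND PROOFS =====

-- the loop bodies of the two ports, named for the proofs (definitionally the port lambdas)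
def astep (mat : List (List Int)) (st : List Nat × List (List Int)) (c : Nat) :
    List Nat × List (List Int) :=
  let rwn := st.1.filter (fun r => decide ((mat.getD r []).getD c 0 ≠ 0))
  if rwn.isEmpty then st
  else rwn.foldl
    (fun (st2 : List Nat × List (List Int)) idx =>
      (st2.1.erase idx, st2.2 ++ [mat.getD idx []])) st

def bstep (N : Nat) (bks : List (List (List Int))) (row : List Int) :
    List (List (List Int)) :=
  match firstNZ (row.take N) 0 with
  | some c => bks.set c (bks.getD c [] ++ [row])
  | none => bks

-- fnz N row: first-nonzero column of `row` among columns < N (what both ports pivot on)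
def fnz (N : Nat) (row : List Int) : Option Nat := firstNZ (row.take N) 0

def keepB (N k : Nat) (mat : List (List Int)) (r : Nat) : Bool :=
  (fnz N (mat.getD r [])).all (fun c => k ≤ c)

def pickB (N c : Nat) (mat : List (List Int)) (r : Nat) : Bool :=
  decide (fnz N (mat.getD r []) = some c)

lemma for_eli_def (mat : List (List Int)) :
    for_eli mat =
      ((List.range ((mat.getD 0 []).length)).foldl (astep mat)
        (List.range mat.length, [])).2 := rfl

lemma for_eli_alt_def (mat : List (List Int)) :
    for_eli_alt mat =
      (mat.foldl (bstep ((mat.getD 0 []).length))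
        (List.replicate ((mat.getD 0 []).length) [])).flatten := rfl

-- ---- firstNZ characterisation ----
lemma firstNZ_shift (l : List Int) (c : Nat) :
    firstNZ l c = (firstNZ l 0).map (· + c) := by
  induction l generalizing c with
  | nil => simp [firstNZ]
  | cons v rest ih =>
    by_cases h : v ≠ 0
    · simp [firstNZ, h]
    · simp only [firstNZ, if_neg h]
      rw [ih (c + 1), ih 1]
      cases firstNZ rest 0 <;> simp <;> omega

lemma firstNZ_some (l : List Int) (j : Nat) (h : firstNZ l 0 = some j) :
    j < l.length ∧ l.getD j 0 ≠ 0 ∧ ∀ i < j, l.getD i 0 = 0 := by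
  induction l generalizing j with
  | nil => simp [firstNZ] at h
  | cons v rest ih =>
    by_cases hv : v ≠ 0
    · simp [firstNZ, hv] at h
      subst h; refine ⟨by simp, by simpa using hv, by omega⟩
    · simp only [firstNZ, if_neg hv] at h
      rw [firstNZ_shift] at h
      cases hr : firstNZ rest 0 with
      | none => simp [hr] at h
      | some j' =>
        simp [hr] at h
        obtain ⟨h1, h2, h3⟩ := ih j' hr
        push_neg at hv
        subst h
        refine ⟨by simpa using h1, by simpa using h2, ?_⟩
        intro i hi
        cases i with
        | zero => simpa using hv
        | succ i' => simpa using h3 i' (by omega)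

lemma firstNZ_none (l : List Int) (h : firstNZ l 0 = none) :
    ∀ i, l.getD i 0 = 0 := by
  induction l with
  | nil => simp
  | cons v rest ih =>
    by_cases hv : v ≠ 0
    · simp [firstNZ, hv] at h
    · simp only [firstNZ, if_neg hv] at h
      rw [firstNZ_shift] at h
      cases hr : firstNZ rest 0 with
      | some j' => simp [hr] at h
      | none =>
        push_neg at hv
        intro i
        cases i with
        | zero => simpa using hv
        | succ i' => simpa using ih hr i'

-- getD through take
lemma getD_take (row : List Int) (N i : Nat) (hi : i < N) :
    (row.take N).getD i 0 = row.getD i 0 := by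
  simp [List.getD, List.getElem?_take, hi]

-- keep && nonzero-at-k = (fnz = some k)  (Bool form, k < N)
lemma pick_eq (mat : List (List Int)) (N k : Nat) (hk : k < N) (r : Nat) :
    (decide ((mat.getD r []).getD k 0 ≠ 0) && keepB N k mat r) = pickB N k mat r := by
  unfold keepB pickB fnz
  cases h : firstNZ ((mat.getD r []).take N) 0 with
  | none =>
    have hz := firstNZ_none _ h k
    rw [getD_take _ _ _ hk] at hz
    simp only [h, Option.all_none, Bool.true_and]
    rw [hz]
    simp
  | some c =>
    obtain ⟨h1, h2, h3⟩ := firstNZ_some _ _ h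
    simp only [h, Option.all_some]
    by_cases hc : k ≤ c
    · rcases Nat.lt_or_ge k c with hlt | hge
      · have hz := h3 k hlt
        rw [getD_take _ _ _ hk] at hz
        have hck : ¬ ((some c : Option Nat) = some k) := by simp; omega
        rw [hz]
        simp [hc, hck]
      · have hck : c = k := by omega
        subst hck
        rw [getD_take _ _ _ hk] at h2
        rw [decide_eq_true h2]
        simp
    · have hck : ¬ ((some c : Option Nat) = some k) := by simp; omega
      simp [hc, hck]

lemma keep_step (mat : List (List Int)) (N k : Nat) (hk : k < N) (r : Nat) :
    ((!decide ((mat.getD r []).getD k 0 ≠ 0)) && keepB N k mat r) = keepB N (k + 1) mat r := by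
  unfold keepB fnz
  cases h : firstNZ ((mat.getD r []).take N) 0 with
  | none =>
    have hz := firstNZ_none _ h k
    rw [getD_take _ _ _ hk] at hz
    simp only [Option.all_none, Bool.true_and]
    rw [hz]
    simp
  | some c =>
    obtain ⟨h1, h2, h3⟩ := firstNZ_some _ _ h
    simp only [Option.all_some]
    by_cases hc : k ≤ c
    · rcases Nat.lt_or_ge k c with hlt | hge
      · have hz := h3 k hlt
        rw [getD_take _ _ _ hk] at hz
        rw [hz]
        simp [hc]
        omega
      · have hck : c = k := by omega
        subst hck
        rw [getD_take _ _ _ hk] at h2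
        rw [decide_eq_true h2]
        simp
    · simp [hc]
      omega

-- ---- fold shape lemmas ----
lemma pair_fold (mat : List (List Int)) (el : List Nat) (a : List Nat) (b : List (List Int)) :
    el.foldl (fun (st2 : List Nat × List (List Int)) idx =>
        (st2.1.erase idx, st2.2 ++ [mat.getD idx []])) (a, b) =
      (el.foldl List.erase a, b ++ el.map (fun r => mat.getD r [])) := by
  induction el generalizing a b with
  | nil => simp
  | cons x xs ih =>
    rw [List.foldl_cons, ih]
    simp

lemma erase_fold_aux (el : List Nat) (x : Nat) (l : List Nat)
    (hx : ∀ a ∈ el, a ≠ x) :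
    el.foldl List.erase (x :: l) = x :: el.foldl List.erase l := by
  induction el generalizing l with
  | nil => rfl
  | cons a as ih =>
    have hax : a ≠ x := hx a (by simp)
    have : (x :: l).erase a = x :: l.erase a := by
      rw [List.erase_cons_tail]
      simp [Ne.symm hax]
    simp only [List.foldl_cons, this]
    exact ih (l.erase a) (fun b hb => hx b (by simp [hb]))

lemma erase_fold (l : List Nat) (hl : l.Nodup) (q : Nat → Bool) :
    (l.filter q).foldl List.erase l = l.filter (fun x => !q x) := by
  induction l with
  | nil => rfl
  | cons x xs ih =>
    have hnd : xs.Nodup := hl.of_cons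
    have hx : x ∉ xs := by simpa using (List.nodup_cons.mp hl).1
    by_cases hq : q x
    · simp only [List.filter_cons, hq, if_pos, List.foldl_cons, List.erase_cons_head]
      simp [hq, ih hnd]
    · simp only [List.filter_cons]
      rw [if_neg (by simp [hq])]
      have hne : ∀ a ∈ xs.filter q, a ≠ x := by
        intro a ha hax
        exact hx (by simpa [hax] using List.mem_of_mem_filter ha)
      rw [erase_fold_aux _ _ _ hne, ih hnd]
      simp [hq]

-- ---- A-side loop invariant ----
lemma keep_zero (mat : List (List Int)) (N r : Nat) : keepB N 0 mat r = true := by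
  unfold keepB
  cases fnz N (mat.getD r []) <;> simp

lemma astep_step (mat : List (List Int)) (N k : Nat) (hk : k < N) :
    astep mat
      ((List.range mat.length).filter (keepB N k mat),
       (List.range k).flatMap (fun c =>
         ((List.range mat.length).filter (pickB N c mat)).map (fun r => mat.getD r []))) k
    = ((List.range mat.length).filter (keepB N (k + 1) mat),
       (List.range (k + 1)).flatMap (fun c =>
         ((List.range mat.length).filter (pickB N c mat)).map (fun r => mat.getD r []))) := by
  have hfil : ((List.range mat.length).filter (keepB N k mat)).filter
        (fun r => decide ((mat.getD r []).getD k 0 ≠ 0))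
      = (List.range mat.length).filter (pickB N k mat) := by
    rw [List.filter_filter]
    exact List.filter_congr (fun r _ => pick_eq mat N k hk r)
  have hkeep : ((List.range mat.length).filter (keepB N k mat)).filter
        (fun r => !decide ((mat.getD r []).getD k 0 ≠ 0))
      = (List.range mat.length).filter (keepB N (k + 1) mat) := by
    rw [List.filter_filter]
    exact List.filter_congr (fun r _ => keep_step mat N k hk r)
  have hflat : (List.range (k + 1)).flatMap (fun c =>
        ((List.range mat.length).filter (pickB N c mat)).map (fun r => mat.getD r []))
      = (List.range k).flatMap (fun c =>
          ((List.range mat.length).filter (pickB N c mat)).map (fun r => mat.getD r []))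
        ++ ((List.range mat.length).filter (pickB N k mat)).map (fun r => mat.getD r []) := by
    rw [List.range_succ, List.flatMap_append]
    simp
  simp only [astep]
  rw [hfil]
  by_cases hE : ((List.range mat.length).filter (pickB N k mat)).isEmpty
  · rw [if_pos hE]
    have hnil := List.isEmpty_iff.mp hE
    have h1 : ((List.range mat.length).filter (keepB N k mat)).filter
        (fun r => !decide ((mat.getD r []).getD k 0 ≠ 0))
        = (List.range mat.length).filter (keepB N k mat) := by
      apply List.filter_eq_self.mpr
      intro r hr
      have hkp : keepB N k mat r = true := (List.mem_filter.mp hr).2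
      have hnp : ¬ (pickB N k mat r = true) := by
        intro hp
        have : r ∈ (List.range mat.length).filter (pickB N k mat) :=
          List.mem_filter.mpr ⟨(List.mem_filter.mp hr).1, hp⟩
        rw [hnil] at this
        simp at this
      rw [← pick_eq mat N k hk r, hkp] at hnp
      simp only [Bool.and_true] at hnp
      simp at hnp
      simpa using hnp
    rw [Prod.mk.injEq]
    constructor
    · rw [← hkeep, h1]
    · rw [hflat, hnil]
      simp
  · rw [if_neg hE]
    rw [pair_fold]
    rw [Prod.mk.injEq]
    constructor
    · rw [← hfil,
        erase_fold ((List.range mat.length).filter (keepB N k mat))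
          ((List.nodup_range).filter _) (fun r => decide ((mat.getD r []).getD k 0 ≠ 0)),
        hkeep]
    · rw [hflat]

lemma A_inv (mat : List (List Int)) (N : Nat) (k : Nat) (hN : N = (mat.getD 0 []).length)
    (hk : k ≤ N) :
    (List.range k).foldl (astep mat) (List.range mat.length, []) =
      ((List.range mat.length).filter (keepB N k mat),
       (List.range k).flatMap (fun c =>
         ((List.range mat.length).filter (pickB N c mat)).map (fun r => mat.getD r []))) := by
  induction k with
  | zero =>
    simp only [List.range_zero, List.foldl_nil, List.flatMap_nil]
    rw [Prod.mk.injEq]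
    refine ⟨?_, rfl⟩
    symm
    apply List.filter_eq_self.mpr
    intro r _
    exact keep_zero mat N r
  | succ k ih =>
    have hk' : k < N := hk
    rw [List.range_succ, List.foldl_append, ih (Nat.le_of_lt hk')]
    simp only [List.foldl_cons, List.foldl_nil]
    exact (astep_step mat N k hk').trans (by rw [List.range_succ])

-- ---- B-side loop invariant ----
lemma getD_map_range {α : Type} (f : Nat → α) (N c : Nat) (hc : c < N) (x : α) :
    ((List.range N).map f).getD c x = f c := by
  simp [List.getD, hc]

lemma set_map_range {α : Type} (f : Nat → α) (N c : Nat) (v : α) :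
    ((List.range N).map f).set c v = (List.range N).map (fun i => if i = c then v else f i) := by
  apply List.ext_getElem
  · simp
  · intro i h1 h2
    simp only [List.getElem_set, List.getElem_map, List.getElem_range]
    by_cases h : c = i
    · subst h; simp
    · rw [if_neg h, if_neg (fun hh => h hh.symm)]

lemma B_inv (N : Nat) (rest pref : List (List Int)) :
    rest.foldl (bstep N)
      ((List.range N).map (fun c => pref.filter (fun row => decide (fnz N row = some c)))) =
      (List.range N).map (fun c =>
        (pref ++ rest).filter (fun row => decide (fnz N row = some c))) := by
  induction rest generalizing pref with
  | nil => simp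
  | cons row rest ih =>
    rw [List.foldl_cons]
    have hstep : bstep N
        ((List.range N).map (fun c => pref.filter (fun r2 => decide (fnz N r2 = some c)))) row
        = (List.range N).map (fun c =>
            (pref ++ [row]).filter (fun r2 => decide (fnz N r2 = some c))) := by
      unfold bstep
      cases h : firstNZ (row.take N) 0 with
      | none =>
        refine List.map_congr_left fun c hc => ?_
        have hne : ¬ (fnz N row = some c) := by simp [fnz, h]
        simp [List.filter_append, hne]
      | some c0 =>
        have hc0 : c0 < N := by
          have h1 := (firstNZ_some _ _ h).1
          simp [List.length_take] at h1
          omega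
        have hfz : fnz N row = some c0 := by simpa [fnz] using h
        dsimp only
        rw [getD_map_range _ _ _ hc0, set_map_range]
        refine List.map_congr_left fun c hc => ?_
        by_cases hcc : c = c0
        · subst hcc
          simp [List.filter_append, hfz]
        · rw [if_neg hcc]
          have hne : ¬ (fnz N row = some c) := by rw [hfz]; simp; omega
          simp [List.filter_append, hne]
    rw [hstep, ih (pref ++ [row])]
    simp [List.append_assoc]

-- index-filter to value-filter bridge
lemma filter_range_map {α : Type} (xs : List α) (p : α → Bool) (d : α) :
    ((List.range xs.length).filter (fun i => p (xs.getD i d))).map (fun i => xs.getD i d) =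
      xs.filter p := by
  induction xs with
  | nil => simp
  | cons x xs ih =>
    rw [List.length_cons, List.range_succ_eq_map]
    have h1 : ((fun i => p ((x :: xs)[i]?.getD d)) ∘ Nat.succ) = fun i => p (xs[i]?.getD d) := by
      funext i; simp
    have h2 : ((fun i => (x :: xs)[i]?.getD d) ∘ Nat.succ) = fun i => xs[i]?.getD d := by
      funext i; simp
    have ih' : List.map (fun i => xs[i]?.getD d)
        (List.filter (fun i => p (xs[i]?.getD d)) (List.range xs.length)) = List.filter p xs := by
      simpa [List.getD] using ih
    by_cases hp : p x <;> simp [hp, List.filter_cons, List.filter_map, h1, h2, ih']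

-- ===== VERDICT (by name: the statement is the Claim_ definition above) =====
theorem for_eli_spec : Claim_equal_for_eli := by
  intro mat _ _
  unfold Spec_for_eli
  rw [for_eli_def, for_eli_alt_def,
    A_inv mat ((mat.getD 0 []).length) ((mat.getD 0 []).length) rfl (Nat.le_refl _)]
  have hinit : (List.replicate ((mat.getD 0 []).length) ([] : List (List Int)))
      = (List.range ((mat.getD 0 []).length)).map (fun c =>
          ([] : List (List Int)).filter (fun row =>
            decide (fnz ((mat.getD 0 []).length) row = some c))) := by
    simp
  rw [hinit, B_inv ((mat.getD 0 []).length) mat []]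
  simp only [List.nil_append]
  rw [List.flatMap_def]
  congr 1
  refine List.map_congr_left fun c hc => ?_
  have hb := filter_range_map mat
    (fun row => decide (fnz ((mat.getD 0 []).length) row = some c)) ([] : List Int)
  simpa [pickB] using hb
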